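-- pv_equiv track=rewrite | github.com/chongtzezhao/CompCoding | KickStart/2019/Round H/H-index.py | solve
-- ===== SOURCE A (Python) =====
-- def solve(N, A):
--     '''H = {}
--     s = ""
--     curmax = 1
--     for item in A:
--         if item not in H:
--             H[item]=1
--         else:
--             H[item]+=1
--         if H[item]>=int(item) and curmax<int(item):
--             curmax = int(item)
--         s+=str(curmax)+' '
--     H = [0]*N
--     H[0]+=1
--     for i in range(1, N):
--         if int(A[i])>H[i-1]:
--             H[i] = H[i-1]+1
--         else:
--             H[i] = H[i-1]
--     s = ""
--     for item in H:
--         s+=str(item)+' '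
--         '''
--     H = [0]*100000
--     s = ""
--     curmax = 1
--     for i in range(N):
--         for j in range(1, int(A[i])+1):
--             H[j]+=1
--             if H[j]>=j and curmax<j:
--                 curmax = j
--         s+=str(curmax)+' '
--     return s
-- ===== SOURCE B (Python) =====
-- def solve(N, A):
--     # Incremental h-index: bucket counts of citations above the current level,
--     # bump the level when enough papers sit above it.  O(N) total.
--     cnt = {}
--     higher = 0
--     m = 1
--     s = ""
--     for i in range(N):
--         c = A[i]
--         if c >= m + 1:
--             cnt[c] = cnt.get(c, 0) + 1
--             higher += 1
--         if higher >= m + 1: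
--             m += 1
--             higher -= cnt.pop(m, 0)
--         s += str(m) + ' '
--     return s
-- ===== Notes on version B (the rewrite author's own statement) =====
-- stated objective: faster
-- what changed: A rescans a 100000-slot histogram, incrementing H[j] for every j up to each paper's citation count (O(N*maxCitation)); B maintains the running h-index incrementally with a dict bucket counter of citations above the current level, bumping the level when enough papers sit above it (O(N) amortized).
import Mathlib
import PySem

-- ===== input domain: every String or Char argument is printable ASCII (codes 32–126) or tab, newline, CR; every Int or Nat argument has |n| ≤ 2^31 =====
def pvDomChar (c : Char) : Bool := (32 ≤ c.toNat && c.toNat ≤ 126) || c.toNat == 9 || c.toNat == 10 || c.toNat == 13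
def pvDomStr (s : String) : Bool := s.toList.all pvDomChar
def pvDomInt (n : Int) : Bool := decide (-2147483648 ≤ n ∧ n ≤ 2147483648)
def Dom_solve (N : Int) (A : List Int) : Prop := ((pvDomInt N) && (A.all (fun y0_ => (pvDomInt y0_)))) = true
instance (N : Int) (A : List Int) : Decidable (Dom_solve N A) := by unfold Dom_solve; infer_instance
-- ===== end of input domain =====

set_option maxRecDepth 8192


-- B replaces A's per-paper sweep over a 100000-slot histogram by an incremental h-index with a
-- bucket counter of citations above the current level (faster; return value only, no mutation).

-- ===== PORT A =====
-- inner 'for j in range(1, int(A[i])+1)' body: H[j] += 1; if H[j] >= j and curmax < j: curmax = j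
-- (j ≥ 1 always; Pre_ keeps j < 100000, where Python would raise IndexError on H[j])
def pvInnerA (p : List Int × Int) (j : Int) : List Int × Int :=
  let H := p.1.set j.toNat (p.1.getD j.toNat 0 + 1)
  (H, if H.getD j.toNat 0 ≥ j ∧ p.2 < j then j else p.2)

-- one iteration of 'for i in range(N)', given c = int(A[i])
def pvStepA (st : List Int × Int × String) (c : Int) : List Int × Int × String :=
  let r := (PySem.List.pyRange 1 (c + 1) 1).foldl pvInnerA (st.1, st.2.1)
  (r.1, r.2, st.2.2 ++ PySem.Int.toStr r.2 ++ " ")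

def solve (N : Int) (A : List Int) : String :=
  ((PySem.List.pyRange 0 N 1).foldl
    (fun st i => pvStepA st ((PySem.List.pyGet? A i).getD 0))  -- A[i]; Pre_ keeps i in range
    (List.replicate 100000 0, 1, "")).2.2

-- ===== PORT B =====
-- one iteration: maybe count c above the level, then maybe bump the level (cnt.pop(m, 0) = read+erase)
def pvStepB (st : PySem.Dict Int Int × Int × Int × String) (c : Int) :
    PySem.Dict Int Int × Int × Int × String :=
  let cnt := st.1
  let higher := st.2.1
  let m := st.2.2.1
  let q := if c ≥ m + 1 then (cnt.insert c (cnt.getD c 0 + 1), higher + 1) else (cnt, higher)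
  let r := if q.2 ≥ m + 1 then (q.1.erase (m + 1), q.2 - q.1.getD (m + 1) 0, m + 1)
           else (q.1, q.2, m)
  (r.1, r.2.1, r.2.2, st.2.2.2 ++ PySem.Int.toStr r.2.2 ++ " ")

def solve_alt (N : Int) (A : List Int) : String :=
  ((PySem.List.pyRange 0 N 1).foldl
    (fun st i => pvStepB st ((PySem.List.pyGet? A i).getD 0))
    ((PySem.Dict.empty : PySem.Dict Int Int), 0, 1, "")).2.2.2

-- ===== PRECONDITION & SPEC =====
-- Pre_ excludes exactly the inputs where A raises IndexError: N beyond len(A), or a citation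
-- ≥ 100000 among the first N (A indexes its fixed 100000-slot histogram with it).
def Pre_solve (N : Int) (A : List Int) : Prop :=
  N ≤ (A.length : Int) ∧ ∀ a ∈ A.take N.toNat, a < 100000
instance (N : Int) (A : List Int) : Decidable (Pre_solve N A) := by unfold Pre_solve; infer_instance

def pvWitness_solve : Int × List Int := (4, [2, 5, 1, 3])

def Spec_solve (N : Int) (A : List Int) (out : String) : Prop := out = solve_alt N A
instance (N : Int) (A : List Int) (out : String) : Decidable (Spec_solve N A out) := by unfold Spec_solve; infer_instance

-- ===== CLAIM (what is proved, stated in full; the proofs are below) =====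
def Claim_equal_solve : Prop := ∀ (N : Int) (A : List Int), Dom_solve N A → Pre_solve N A → Spec_solve N A (solve N A)

-- ===== LEMMAS AND PROOFS =====

-- #{a ∈ l : j ≤ a}, as an Int
def pvCntGe (l : List Int) (j : Int) : Int := (l.countP (fun a => j ≤ a) : Int)

-- the common abstract step: the h-level after one more paper c on top of history P
def pvHStep (P : List Int) (m c : Int) : Int :=
  if m + 1 ≤ pvCntGe (P ++ [c]) (m + 1) then m + 1 else m

-- A-side state invariant: H is the histogram of P (at the live indices) and m = curmax
def pvInvA (P H : List Int) (m : Int) : Prop :=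
  H.length = 100000 ∧ (∀ j : Nat, 1 ≤ j → j < 100000 → H.getD j 0 = pvCntGe P (j : Int)) ∧
    1 ≤ m ∧ pvCntGe P (m + 1) ≤ m

-- B-side state invariant
def pvInvB (P : List Int) (cnt : PySem.Dict Int Int) (higher m : Int) : Prop :=
  higher = pvCntGe P (m + 1) ∧ ∀ v : Int, m + 1 ≤ v → cnt.getD v 0 = (P.count v : Int)

lemma pvCntGe_nil (j : Int) : pvCntGe [] j = 0 := rfl

lemma pvCount_append (P : List Int) (c v : Int) :
    (((P ++ [c]).count v : Nat) : Int) = (P.count v : Int) + if c = v then 1 else 0 := by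
  rw [List.count_append]
  by_cases h : c = v <;> simp [h]

lemma pvCntGe_append (l : List Int) (c j : Int) :
    pvCntGe (l ++ [c]) j = pvCntGe l j + if j ≤ c then 1 else 0 := by
  simp only [pvCntGe, List.countP_append, List.countP_cons, List.countP_nil]
  push_cast
  by_cases h : j ≤ c <;> simp [h]

lemma pvCntGe_mono (l : List Int) {i j : Int} (h : i ≤ j) : pvCntGe l j ≤ pvCntGe l i := by
  have := List.countP_mono_left (l := l) (p := fun a => decide (j ≤ a)) (q := fun a => decide (i ≤ a))
    (by intro x _ hx; simp only [decide_eq_true_eq] at *; omega)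
  simpa [pvCntGe] using Int.ofNat_le.mpr this

lemma pvCntGe_succ (l : List Int) (j : Int) :
    pvCntGe l j = pvCntGe l (j + 1) + (l.count j : Int) := by
  induction l with
  | nil => simp [pvCntGe]
  | cons a t ih =>
    simp only [pvCntGe, List.countP_cons, List.count_cons] at *
    push_cast at *
    split_ifs with h1 h2 h3 <;> simp_all <;> omega

lemma pvGetD_set_self (l : List Int) (i : Nat) (h : i < l.length) (v : Int) :
    (l.set i v).getD i 0 = v := by
  simp [List.getD_eq_getElem?_getD, h]

lemma pvGetD_set_ne (l : List Int) (i j : Nat) (h : j ≠ i) (v : Int) :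
    (l.set i v).getD j 0 = l.getD j 0 := by
  simp [List.getD_eq_getElem?_getD, List.getElem?_set_ne (Ne.symm h)]

lemma pvDict_getD_erase_of_ne (d : PySem.Dict Int Int) (k k' : Int) (h : k' ≠ k) (d0 : Int) :
    (d.erase k).getD k' d0 = d.getD k' d0 := by
  obtain ⟨items⟩ := d
  simp only [PySem.Dict.getD, PySem.Dict.get?, PySem.Dict.erase, List.find?_filter]
  have hpred : (fun (a : Int × Int) => decide ((!a.1 == k) = true ∧ (a.1 == k') = true))
      = (fun (p : Int × Int) => p.1 == k') := by
    funext a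
    by_cases ha : a.1 = k' <;> simp [ha, h]
  rw [hpred]

lemma pvInnerA_eq (H : List Int) (cm j : Int) :
    pvInnerA (H, cm) j = (H.set j.toNat (H.getD j.toNat 0 + 1),
      if (H.set j.toNat (H.getD j.toNat 0 + 1)).getD j.toNat 0 ≥ j ∧ cm < j then j
      else cm) := rfl

lemma pvInner_spec (P H : List Int) (m : Int) (hInv : pvInvA P H m) (c : Int)
    (hc : c < 100000) (k : Nat) (hk : (k : Int) ≤ c) :
    ∃ H', (PySem.List.pyRange 1 ((k : Int) + 1) 1).foldl pvInnerA (H, m)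
        = (H', if m + 1 ≤ (k : Int) ∧ m + 1 ≤ pvCntGe (P ++ [c]) (m + 1) then m + 1 else m)
      ∧ H'.length = 100000
      ∧ ∀ j : Nat, 1 ≤ j → j < 100000 →
          H'.getD j 0 = if (j : Int) ≤ (k : Int) then pvCntGe (P ++ [c]) (j : Int)
                        else pvCntGe P (j : Int) := by
  obtain ⟨hlen, hget, hm, hle⟩ := hInv
  induction k with
  | zero =>
    refine ⟨H, ?_, hlen, ?_⟩
    · rw [show (((0 : Nat) : Int)) + 1 = 1 by norm_num, PySem.List.pyRange_one_eq_nil le_rfl]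
      simp only [List.foldl_nil]
      rw [if_neg (by rintro ⟨h1, -⟩; omega)]
    · intro j h1 h2
      rw [if_neg (by omega), hget j h1 h2]
  | succ k ihk =>
    have hkc : (k : Int) ≤ c := by push_cast at hk ⊢; omega
    obtain ⟨H', hfold, hlen', hget'⟩ := ihk hkc
    have hjc : (k : Int) + 1 ≤ c := by push_cast at hk; omega
    have hjn : ((k : Int) + 1).toNat = k + 1 := by omega
    have hjlt : k + 1 < 100000 := by omega
    rw [show (((k + 1 : Nat) : Int)) + 1 = ((k : Int) + 1) + 1 by push_cast; ring,
        PySem.List.pyRange_one_succ_right (by omega : (1 : Int) ≤ (k : Int) + 1),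
        List.foldl_append, hfold]
    simp only [List.foldl_cons, List.foldl_nil]
    rw [pvInnerA_eq, hjn]
    have hHj : H'.getD (k + 1) 0 = pvCntGe P ((k : Int) + 1) := by
      rw [hget' (k + 1) (by omega) hjlt, if_neg (by push_cast; omega)]
      norm_cast
    have hset : (H'.set (k + 1) (H'.getD (k + 1) 0 + 1)).getD (k + 1) 0
        = pvCntGe (P ++ [c]) ((k : Int) + 1) := by
      rw [pvGetD_set_self _ _ (by rw [hlen']; omega), hHj, pvCntGe_append, if_pos hjc]
    refine ⟨H'.set (k + 1) (H'.getD (k + 1) 0 + 1), ?_,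
      by rw [List.length_set, hlen'], ?_⟩
    · congr 1
      rw [hset]
      by_cases hjm : (k : Int) + 1 ≤ m
      · have hcmk : (if m + 1 ≤ (k : Int) ∧ m + 1 ≤ pvCntGe (P ++ [c]) (m + 1)
            then m + 1 else m) = m := if_neg (by rintro ⟨h1, -⟩; omega)
        rw [hcmk, if_neg (by rintro ⟨-, h2⟩; omega), if_neg (by rintro ⟨h1, -⟩; push_cast at h1; omega)]
      · by_cases hj1 : (k : Int) + 1 = m + 1
        · have hcmk : (if m + 1 ≤ (k : Int) ∧ m + 1 ≤ pvCntGe (P ++ [c]) (m + 1)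
              then m + 1 else m) = m := if_neg (by rintro ⟨h1, -⟩; omega)
          rw [hcmk]
          by_cases hG : m + 1 ≤ pvCntGe (P ++ [c]) (m + 1)
          · rw [if_pos ⟨by rw [hj1]; exact hG, by omega⟩,
                if_pos ⟨by push_cast; omega, hG⟩, hj1]
          · rw [if_neg (by rintro ⟨h1, -⟩; rw [hj1] at h1; exact hG h1),
                if_neg (by rintro ⟨-, h2⟩; exact hG h2)]
        · have hj2 : m + 2 ≤ (k : Int) + 1 := by omega
          have hmono := pvCntGe_mono (P ++ [c]) (show m + 1 ≤ (k : Int) + 1 by omega)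
          have happ : pvCntGe (P ++ [c]) (m + 1) ≤ pvCntGe P (m + 1) + 1 := by
            rw [pvCntGe_append]; split_ifs <;> omega
          rw [if_neg (by rintro ⟨h1, -⟩; omega)]
          have hk1 : m + 1 ≤ (k : Int) := by omega
          by_cases hG : m + 1 ≤ pvCntGe (P ++ [c]) (m + 1)
          · rw [if_pos ⟨hk1, hG⟩, if_pos ⟨by push_cast; omega, hG⟩]
          · rw [if_neg (by rintro ⟨-, h2⟩; exact hG h2),
                if_neg (by rintro ⟨-, h2⟩; exact hG h2)]
    · intro j' h1' h2'
      by_cases hj' : j' = k + 1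
      · subst hj'
        rw [pvGetD_set_self _ _ (by rw [hlen']; omega), hHj]
        push_cast
        rw [if_pos (le_refl ((k : Int) + 1)), pvCntGe_append, if_pos hjc]
      · rw [pvGetD_set_ne _ _ _ hj', hget' j' h1' h2']
        by_cases hcc : (j' : Int) ≤ (k : Int)
        · rw [if_pos hcc, if_pos (by push_cast at hcc ⊢; omega)]
        · rw [if_neg hcc, if_neg (by push_cast at hcc ⊢; omega)]

lemma pvStepA_spec (P H : List Int) (m : Int) (s : String) (c : Int) (hc : c < 100000)
    (hInv : pvInvA P H m) :
    ∃ H', pvStepA (H, m, s) c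
        = (H', pvHStep P m c, s ++ PySem.Int.toStr (pvHStep P m c) ++ " ")
      ∧ pvInvA (P ++ [c]) H' (pvHStep P m c) := by
  obtain ⟨hlen, hget, hm, hle⟩ := hInv
  by_cases hc0 : c < 1
  · have hnil : PySem.List.pyRange 1 (c + 1) 1 = [] := PySem.List.pyRange_one_eq_nil (by omega)
    have hP' : ∀ j : Int, 1 ≤ j → pvCntGe (P ++ [c]) j = pvCntGe P j := by
      intro j hj; rw [pvCntGe_append, if_neg (by omega)]; ring
    have hH : pvHStep P m c = m := by
      unfold pvHStep; rw [hP' (m + 1) (by omega), if_neg (by omega)]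
    refine ⟨H, ?_, ?_⟩
    · unfold pvStepA
      rw [hnil]
      simp only [List.foldl_nil]
      rw [hH]
    · rw [hH]
      exact ⟨hlen, fun j h1 h2 => by
          rw [hget j h1 h2, hP' (j : Int) (by exact_mod_cast h1)], hm,
        by rw [hP' (m + 1) (by omega)]; exact hle⟩
  · obtain ⟨H', hfold, hlen', hget'⟩ :=
      pvInner_spec P H m ⟨hlen, hget, hm, hle⟩ c hc (c.toNat) (by omega)
    have hcast : ((c.toNat : Nat) : Int) = c := Int.toNat_of_nonneg (by omega)
    rw [hcast] at hfold hget'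
    have hH : (if m + 1 ≤ c ∧ m + 1 ≤ pvCntGe (P ++ [c]) (m + 1) then m + 1 else m)
        = pvHStep P m c := by
      unfold pvHStep
      by_cases hmc : m + 1 ≤ c
      · by_cases hG : m + 1 ≤ pvCntGe (P ++ [c]) (m + 1)
        · rw [if_pos ⟨hmc, hG⟩, if_pos hG]
        · rw [if_neg (by rintro ⟨-, h2⟩; exact hG h2), if_neg hG]
      · have heq : pvCntGe (P ++ [c]) (m + 1) = pvCntGe P (m + 1) := by
          rw [pvCntGe_append, if_neg hmc]; ring
        rw [if_neg (by rintro ⟨h1, -⟩; exact hmc h1), heq, if_neg (by omega)]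
    refine ⟨H', ?_, ?_⟩
    · unfold pvStepA
      rw [hfold, hH]
    · have happ : pvCntGe (P ++ [c]) (m + 2) ≤ pvCntGe P (m + 2) + 1 := by
        rw [pvCntGe_append]; split_ifs <;> omega
      have hmono := pvCntGe_mono P (show m + 1 ≤ m + 2 by omega)
      refine ⟨hlen', fun j h1 h2 => ?_, by unfold pvHStep; split_ifs <;> omega, ?_⟩
      · rw [hget' j h1 h2]
        by_cases hcc : (j : Int) ≤ c
        · rw [if_pos hcc]
        · rw [if_neg hcc, pvCntGe_append, if_neg (by omega)]; ring
      · unfold pvHStep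
        split_ifs with hG
        · have : pvCntGe (P ++ [c]) (m + 1 + 1) ≤ pvCntGe P (m + 2) + 1 := by
            rw [show m + 1 + 1 = m + 2 by ring]; exact happ
          omega
        · omega

lemma pvStepB_spec (P : List Int) (cnt : PySem.Dict Int Int) (higher m : Int) (s : String)
    (c : Int) (_hm : 1 ≤ m) (hle : pvCntGe P (m + 1) ≤ m) (hInv : pvInvB P cnt higher m) :
    ∃ cnt' higher', pvStepB (cnt, higher, m, s) c
        = (cnt', higher', pvHStep P m c, s ++ PySem.Int.toStr (pvHStep P m c) ++ " ")
      ∧ pvInvB (P ++ [c]) cnt' higher' (pvHStep P m c) := by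
  obtain ⟨hhig, hcnt⟩ := hInv
  have hGe : pvCntGe (P ++ [c]) (m + 1) = higher + (if m + 1 ≤ c then 1 else 0) := by
    rw [pvCntGe_append, hhig]
  by_cases hc1 : c ≥ m + 1
  · have hq : pvCntGe (P ++ [c]) (m + 1) = higher + 1 := by rw [hGe, if_pos hc1]
    have hins : ∀ v : Int, m + 1 ≤ v →
        (cnt.insert c (cnt.getD c 0 + 1)).getD v 0 = ((P ++ [c]).count v : Int) := by
      intro v hv
      rw [PySem.Dict.getD_insert]
      by_cases hvc : v = c
      · rw [if_pos hvc, pvCount_append, if_pos hvc.symm, hvc, hcnt c hc1]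
      · rw [if_neg hvc, pvCount_append, if_neg (fun h => hvc h.symm), hcnt v hv]; ring
    by_cases hb : higher + 1 ≥ m + 1
    · have hH : pvHStep P m c = m + 1 := by unfold pvHStep; rw [hq, if_pos (by omega)]
      refine ⟨(cnt.insert c (cnt.getD c 0 + 1)).erase (m + 1),
        higher + 1 - (cnt.insert c (cnt.getD c 0 + 1)).getD (m + 1) 0, ?_, ?_, ?_⟩
      · simp only [pvStepB, if_pos hc1, if_pos hb]
        rw [hH]
      · rw [hH, hins (m + 1) le_rfl]
        have := pvCntGe_succ (P ++ [c]) (m + 1)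
        omega
      · intro v hv
        rw [hH] at hv
        rw [pvDict_getD_erase_of_ne _ _ _ (by omega), hins v (by omega)]
    · have hH : pvHStep P m c = m := by unfold pvHStep; rw [hq, if_neg (by omega)]
      refine ⟨cnt.insert c (cnt.getD c 0 + 1), higher + 1, ?_, ?_, ?_⟩
      · simp only [pvStepB, if_pos hc1, if_neg hb]
        rw [hH]
      · rw [hH, hq]
      · intro v hv
        rw [hH] at hv
        exact hins v hv
  · have hq : pvCntGe (P ++ [c]) (m + 1) = higher := by rw [hGe, if_neg hc1]; ring
    have hnb : ¬ higher ≥ m + 1 := by omega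
    have hH : pvHStep P m c = m := by unfold pvHStep; rw [hq, if_neg (by omega)]
    refine ⟨cnt, higher, ?_, ?_, ?_⟩
    · simp only [pvStepB, if_neg hc1, if_neg hnb]
      rw [hH]
    · rw [hH, hq]
    · intro v hv
      rw [hH] at hv
      rw [pvCount_append, if_neg (by omega), hcnt v hv]; ring

lemma pvMain (l : List Int) : ∀ (P H : List Int) (m : Int) (cnt : PySem.Dict Int Int)
    (higher : Int) (s : String), (∀ c ∈ l, c < 100000) → pvInvA P H m → pvInvB P cnt higher m →
    (l.foldl pvStepA (H, m, s)).2.2 = (l.foldl pvStepB (cnt, higher, m, s)).2.2.2 := by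
  induction l with
  | nil => intro _ _ _ _ _ _ _ _ _; rfl
  | cons c t ih =>
    intro P H m cnt higher s hlt hA hB
    obtain ⟨H', hstep, hInvA'⟩ := pvStepA_spec P H m s c (hlt c (by simp)) hA
    obtain ⟨cnt', higher', hstepB, hInvB'⟩ :=
      pvStepB_spec P cnt higher m s c hA.2.2.1 hA.2.2.2 hB
    simp only [List.foldl_cons, hstep, hstepB]
    exact ih (P ++ [c]) H' _ cnt' higher' _ (fun x hx => hlt x (by simp [hx])) hInvA' hInvB'

lemma pvDriver {σ : Type} (g : σ → Int → σ) (A : List Int) (n : Nat) (hn : n ≤ A.length)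
    (init : σ) :
    (PySem.List.pyRange 0 (n : Int) 1).foldl
      (fun st i => g st ((PySem.List.pyGet? A i).getD 0)) init
    = (A.take n).foldl g init := by
  induction n with
  | zero => simp [PySem.List.pyRange_one_eq_nil]
  | succ n ih =>
    have hlt : n < A.length := by omega
    rw [show ((n + 1 : Nat) : Int) = (n : Int) + 1 by push_cast; ring,
        PySem.List.pyRange_one_succ_right (by exact_mod_cast Nat.zero_le n),
        List.foldl_append, ih (by omega)]
    rw [show A.take (n + 1) = A.take n ++ [A[n]] from by
          rw [List.take_add_one, List.getElem?_eq_getElem hlt]; rfl,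
        List.foldl_append]
    simp only [List.foldl_cons, List.foldl_nil]
    rw [PySem.List.pyGet?_natCast, List.getElem?_eq_getElem hlt]
    rfl

-- ===== VERDICT (by name: the statement is the Claim_ definition above) =====
theorem solve_spec : Claim_equal_solve := by
  intro N A _ hpre
  unfold Spec_solve solve solve_alt
  by_cases h : 0 ≤ N
  · have hn : N.toNat ≤ A.length := by
      have := hpre.1; omega
    rw [show N = ((N.toNat : Nat) : Int) from (Int.toNat_of_nonneg h).symm,
        pvDriver _ A N.toNat hn, pvDriver _ A N.toNat hn]
    apply pvMain _ [] _ _ _ _ _ hpre.2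
    · refine ⟨List.length_replicate, fun j _ hj => ?_, le_refl 1,
        by rw [pvCntGe_nil]; omega⟩
      rw [List.getD_eq_getElem?_getD, List.getElem?_replicate, if_pos hj, Option.getD_some,
        pvCntGe_nil]
    · refine ⟨by rw [pvCntGe_nil], fun v _ => ?_⟩
      rw [PySem.Dict.getD_empty]
      rfl
  · rw [PySem.List.pyRange_one_eq_nil (by omega : N ≤ (0 : Int))]
    rfl
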